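-- pv_equiv track=rewrite | github.com/OiciruamauriciO/filetransferv4 | entrada - ruta al 14042025/procesararchivocfgris.py | procesar_linea
-- ===== SOURCE A (Python) =====
-- def procesar_linea(linea, estructura):
--     resultado = ""
--     idx = 0  # Índice en la línea original
--
--     for i, campo in enumerate(estructura):
--         if i % 2 == 0:
--             # Es un campo de datos: extraer y avanzar el índice
--             resultado += linea[idx:idx + campo]
--             idx += campo
--         else:
--             # Es un espacio: agregar espacio, NO avanzar índice
--             resultado += " "
--
--     return resultado
--
-- estructura = [4,1,3,1,8,1,8,1,2,1,4,1,3,1,1,1,3,1,1,1,2,1,5,1,4,1,2,1,1,1,1,1,3,1,5,3,1,1,4,1,4,1,4,1,7,1,7,1,15,1,15,1,15,1,15,1,1,1,12,1,3,1,17,1,20,1,2,1,2,1,3,1,4,1,4,1,1,1,1,1,19,1,20,1,3,1,1]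
-- ===== SOURCE B (Python) =====
-- def procesar_linea(linea, estructura):
--     fields = []
--     off = 0
--     for campo in estructura[0::2]:
--         fields.append(linea[off:off + campo])
--         off += campo
--     resultado = " ".join(fields)
--     if estructura and len(estructura) % 2 == 0:
--         resultado += " "
--     return resultado
-- ===== Notes on version B (the rewrite author's own statement) =====
-- stated objective: simpler
-- what changed: Replaces A's single parity-branched interleaving loop (enumerate + i%2 test threading an index) by slicing the data-field widths out as estructura[0::2], one widths-only loop collecting the field slices via a running offset, ' '.join(fields), and one trailing space when estructura has even nonzero length.
import Mathlib
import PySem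

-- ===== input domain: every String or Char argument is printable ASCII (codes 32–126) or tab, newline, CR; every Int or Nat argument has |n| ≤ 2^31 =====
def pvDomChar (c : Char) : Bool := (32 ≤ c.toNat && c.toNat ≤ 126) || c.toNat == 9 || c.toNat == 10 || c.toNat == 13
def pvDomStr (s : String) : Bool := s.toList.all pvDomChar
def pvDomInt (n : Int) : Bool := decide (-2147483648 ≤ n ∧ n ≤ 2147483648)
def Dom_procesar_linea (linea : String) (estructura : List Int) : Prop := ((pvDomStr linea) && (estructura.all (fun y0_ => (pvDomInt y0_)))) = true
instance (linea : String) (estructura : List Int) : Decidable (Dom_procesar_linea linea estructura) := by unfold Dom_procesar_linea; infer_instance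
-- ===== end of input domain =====

-- B replaces A's parity-branched interleaving loop by a widths-only (estructura[0::2]) slicing
-- pass plus ' '.join and a trailing-space boundary fix (objective: simpler decomposition).

-- ===== PORT A =====
-- literal port of A: one loop over enumerate(estructura) with a parity branch,
-- threading (resultado, idx); strings are modelled as List Char.
def procesar_linea (linea : String) (estructura : List Int) : String :=
  let st := (PySem.List.enumerate estructura).foldl
    (fun (st : List Char × Int) ic =>
      if PySem.Int.mod ic.1 2 = 0 then
        (st.1 ++ PySem.List.slice linea.toList (some st.2) (some (st.2 + ic.2)), st.2 + ic.2)
      else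
        (st.1 ++ [' '], st.2))
    ([], 0)
  String.ofList st.1

-- ===== PORT B =====
-- literal port of Source B: widths = estructura[0::2]; one loop appending slices while
-- advancing the offset; ' '.join(fields); trailing space iff estructura is nonempty of even length.
def procesar_linea_alt (linea : String) (estructura : List Int) : String :=
  let widths := (PySem.List.slice? estructura (some 0) none 2).getD []
  let st := widths.foldl
    (fun (st : List (List Char) × Int) campo =>
      (st.1 ++ [PySem.List.slice linea.toList (some st.2) (some (st.2 + campo))], st.2 + campo))
    ([], 0)
  let resultado := PySem.Chars.join [' '] st.1
  let resultado := if estructura ≠ [] ∧ estructura.length % 2 = 0 then resultado ++ [' '] else resultado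
  String.ofList resultado

-- ===== PRECONDITION & SPEC =====
def Spec_procesar_linea (linea : String) (estructura : List Int) (out : String) : Prop := out = procesar_linea_alt linea estructura
instance (linea : String) (estructura : List Int) (out : String) : Decidable (Spec_procesar_linea linea estructura out) := by unfold Spec_procesar_linea; infer_instance

-- ===== CLAIM (what is proved, stated in full; the proofs are below) =====
def Claim_equal_procesar_linea : Prop := ∀ (linea : String) (estructura : List Int), Dom_procesar_linea linea estructura → Spec_procesar_linea linea estructura (procesar_linea linea estructura)

-- ===== LEMMAS AND PROOFS =====

-- the slice of linea that one data field of width w at offset idx extracts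
def pvSl (linea : List Char) (idx w : Int) : List Char :=
  PySem.List.slice linea (some idx) (some (idx + w))

-- the even-index elements of a list (what estructura[0::2] selects)
def pvEvens {α : Type} : List α → List α
  | [] => []
  | [x] => [x]
  | x :: _ :: r => x :: pvEvens r

-- what A's loop appends, consuming estructura two (field, space) entries at a time
def pvOutA (linea : List Char) : List Int → Int → List Char
  | [], _ => []
  | [w], idx => pvSl linea idx w
  | w :: _ :: r, idx => pvSl linea idx w ++ [' '] ++ pvOutA linea r (idx + w)

-- the field list B's loop builds from the widths
def pvFlds (linea : List Char) : List Int → Int → List (List Char)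
  | [], _ => []
  | w :: ws, idx => pvSl linea idx w :: pvFlds linea ws (idx + w)

theorem pvEvens_ne_nil {α : Type} (x : α) (l : List α) : pvEvens (x :: l) ≠ [] := by
  cases l <;> simp [pvEvens]

theorem pv_filterMap_evens {α : Type} : ∀ l : List α,
    List.filterMap (fun k => l[2 * k]?) (List.range ((l.length + 1) / 2)) = pvEvens l := by
  intro l
  induction l using pvEvens.induct with
  | case1 => simp [pvEvens]
  | case2 x => simp [pvEvens]
  | case3 x y r ih =>
    have hlen : ((x :: y :: r).length + 1) / 2 = (r.length + 1) / 2 + 1 := by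
      simp; omega
    rw [hlen, List.range_succ_eq_map, List.filterMap_cons, List.filterMap_map]
    simp only [Nat.mul_zero, List.getElem?_cons_zero]
    have : ((fun k => (x :: y :: r)[2 * k]?) ∘ Nat.succ) = (fun k => r[2 * k]?) := by
      funext k
      have h2 : 2 * k.succ = (2 * k + 1) + 1 := by omega
      simp only [Function.comp_apply, h2, List.getElem?_cons_succ]
    rw [this, ih]
    rfl

-- estructura[0::2] is exactly the even-index elements
theorem pv_slice2 {α : Type} (l : List α) :
    PySem.List.slice? l (some 0) none 2 = some (pvEvens l) := by
  rw [← pv_filterMap_evens l]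
  simp only [PySem.List.slice?, PySem.List.sliceIndices]
  norm_num
  have hc : (if 0 < l.length then (((l.length : Int) + 2 - 1) / 2).toNat else 0) = (l.length + 1) / 2 := by
    split_ifs with h <;> omega
  rw [hc]
  have hf : (fun x : Nat => l[(2 * (x : Int)).toNat]?) = (fun k : Nat => l[2 * k]?) := by
    funext k; rw [show ((2 : Int) * (k : Int)).toNat = 2 * k by omega]
  rw [hf]

-- A's loop, characterised: the parity branch alternates, so starting at an even
-- enumeration index the fold appends exactly pvOutA.
theorem pv_loopA (linea : List Char) : ∀ (l : List Int) (s : Int) (res : List Char) (idx : Int),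
    s % 2 = 0 →
    ((PySem.List.enumerate l s).foldl
      (fun (st : List Char × Int) ic =>
        if PySem.Int.mod ic.1 2 = 0 then
          (st.1 ++ PySem.List.slice linea (some st.2) (some (st.2 + ic.2)), st.2 + ic.2)
        else
          (st.1 ++ [' '], st.2))
      (res, idx)).1 = res ++ pvOutA linea l idx := by
  intro l
  induction l using pvEvens.induct with
  | case1 => intro s res idx _; simp [PySem.List.enumerate_nil, pvOutA]
  | case2 w =>
    intro s res idx hs
    have he : PySem.Int.mod s 2 = 0 := by
      rw [PySem.Int.mod_eq_emod_of_pos (by norm_num)]; exact hs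
    rw [PySem.List.enumerate_cons, PySem.List.enumerate_nil]
    simp only [List.foldl_cons, List.foldl_nil, he, if_true]
    simp [pvOutA, pvSl]
  | case3 w sp r ih =>
    intro s res idx hs
    have he : PySem.Int.mod s 2 = 0 := by
      rw [PySem.Int.mod_eq_emod_of_pos (by norm_num)]; exact hs
    have ho : ¬ (PySem.Int.mod (s + 1) 2 = 0) := by
      rw [PySem.Int.mod_eq_emod_of_pos (by norm_num)]; omega
    rw [PySem.List.enumerate_cons, PySem.List.enumerate_cons]
    simp only [List.foldl_cons, he, ho, ite_true, ite_false]
    rw [ih (s + 1 + 1) _ _ (by omega)]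
    simp [pvOutA, pvSl]

-- B's loop, characterised: it builds exactly pvFlds of the widths.
theorem pv_loopB (linea : List Char) : ∀ (ws : List Int) (fields : List (List Char)) (idx : Int),
    (ws.foldl
      (fun (st : List (List Char) × Int) campo =>
        (st.1 ++ [PySem.List.slice linea (some st.2) (some (st.2 + campo))], st.2 + campo))
      (fields, idx)).1 = fields ++ pvFlds linea ws idx := by
  intro ws
  induction ws with
  | nil => intro fields idx; simp [pvFlds]
  | cons w ws ih =>
    intro fields idx
    simp only [List.foldl_cons]
    rw [ih]
    simp [pvFlds, pvSl]

-- joining the fields with one space, plus a trailing space exactly when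
-- estructura is nonempty of even length, is what A's interleaving produces.
theorem pv_join (linea : List Char) : ∀ (l : List Int) (idx : Int),
    pvOutA linea l idx =
      PySem.Chars.join [' '] (pvFlds linea (pvEvens l) idx) ++
        (if l ≠ [] ∧ l.length % 2 = 0 then [' '] else []) := by
  intro l
  induction l using pvEvens.induct with
  | case1 => intro idx; simp [pvOutA, pvEvens, pvFlds, PySem.Chars.join, List.intercalate]
  | case2 w => intro idx; simp [pvOutA, pvEvens, pvFlds, PySem.Chars.join, List.intercalate]
  | case3 w sp r ih =>
    intro idx
    rcases r with _ | ⟨z, r'⟩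
    · simp [pvOutA, pvEvens, pvFlds, PySem.Chars.join, List.intercalate]
    · have hne : pvFlds linea (pvEvens (z :: r')) (idx + w) ≠ [] := by
        have := pvEvens_ne_nil z r'
        cases h : pvEvens (z :: r') with
        | nil => exact absurd h this
        | cons a as => simp [pvFlds]
      have hjoin : PySem.Chars.join [' ']
          (pvSl linea idx w :: pvFlds linea (pvEvens (z :: r')) (idx + w)) =
          pvSl linea idx w ++ [' '] ++
            PySem.Chars.join [' '] (pvFlds linea (pvEvens (z :: r')) (idx + w)) := by
        cases h : pvFlds linea (pvEvens (z :: r')) (idx + w) with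
        | nil => exact absurd h hne
        | cons f fs => simp [PySem.Chars.join, List.intercalate]
      show pvSl linea idx w ++ [' '] ++ pvOutA linea (z :: r') (idx + w) = _
      rw [ih (idx + w)]
      simp only [pvEvens, pvFlds, hjoin, List.length_cons, ne_eq, List.cons_ne_nil,
        not_false_iff, true_and]
      have hmod : (r'.length + 1 + 1 + 1) % 2 = (r'.length + 1) % 2 := by omega
      rw [hmod]
      simp [List.append_assoc]

-- ===== VERDICT (by name: the statement is the Claim_ definition above) =====
theorem procesar_linea_spec : Claim_equal_procesar_linea := by
  intro linea estructura _
  unfold Spec_procesar_linea procesar_linea procesar_linea_alt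
  rw [pv_slice2 estructura]
  simp only [Option.getD_some]
  rw [pv_loopA linea.toList estructura 0 [] 0 (by norm_num),
      pv_loopB linea.toList (pvEvens estructura) [] 0]
  rw [pv_join linea.toList estructura 0]
  simp only [List.nil_append]
  split_ifs <;> simp
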